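-- pv_equiv track=rewrite | github.com/sovyx-ai/sovyx | src/sovyx/upgrade/importer.py | _extract_body_content
-- ===== SOURCE A (Python) =====
-- def _extract_body_content(body: str) -> str:
--     """Extract content from body, skipping the first heading line."""
--     lines = body.split("\n")
--     content_lines = []
--     skip_first_heading = True
--     for line in lines:
--         if skip_first_heading and line.startswith("#"):
--             skip_first_heading = False
--             continue
--         skip_first_heading = False
--         content_lines.append(line)
--     return "\n".join(content_lines).strip()
-- ===== SOURCE B (Python) =====
-- def _extract_body_content(body: str) -> str:
--     """Extract content from body, skipping the first heading line."""
--     lines = body.split("\n")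
--     if lines and lines[0].startswith("#"):
--         lines = lines[1:]
--     return "\n".join(lines).strip()
-- ===== Notes on version B (the rewrite author's own statement) =====
-- stated objective: simpler
-- what changed: Replaces the loop with a skip_first_heading flag and accumulator by a direct conditional slice: the first line is dropped iff it is a heading line, then join and strip.
import Mathlib
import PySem

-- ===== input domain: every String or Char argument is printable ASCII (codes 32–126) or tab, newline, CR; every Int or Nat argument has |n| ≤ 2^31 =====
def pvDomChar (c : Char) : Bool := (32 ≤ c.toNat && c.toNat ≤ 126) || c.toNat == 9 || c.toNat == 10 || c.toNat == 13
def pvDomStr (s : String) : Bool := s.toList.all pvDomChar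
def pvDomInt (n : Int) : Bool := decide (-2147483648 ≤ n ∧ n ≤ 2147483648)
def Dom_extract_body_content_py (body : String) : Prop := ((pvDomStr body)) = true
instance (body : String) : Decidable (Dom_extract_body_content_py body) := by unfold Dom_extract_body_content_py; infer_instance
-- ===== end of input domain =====

-- B replaces A's flagged loop by a conditional slice dropping the first line when it is a heading (simpler decomposition, same result).

-- ===== PORT A =====
-- A's loop body: the (content_lines, skip_first_heading) state update
def pvStepA (st : List String × Bool) (line : String) : List String × Bool :=
  if st.2 && PySem.Str.startswith line "#" then (st.1, false)
  else (st.1 ++ [line], false)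

def extract_body_content_py (body : String) : String :=
  let lines := (PySem.Str.split? body "\n").getD []  -- sep = "\n" ≠ "", so split? is always some
  let st := lines.foldl pvStepA ([], true)
  PySem.Str.strip (PySem.Str.join "\n" st.1)

-- ===== PORT B =====
def extract_body_content_py_alt (body : String) : String :=
  let lines := (PySem.Str.split? body "\n").getD []  -- sep = "\n" ≠ "", so split? is always some
  let lines' :=
    match lines with
    | l :: rest => if PySem.Str.startswith l "#" then rest else lines
    | [] => lines
  PySem.Str.strip (PySem.Str.join "\n" lines')

-- ===== PRECONDITION & SPEC =====
def Spec_extract_body_content_py (body : String) (out : String) : Prop := out = extract_body_content_py_alt body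
instance (body : String) (out : String) : Decidable (Spec_extract_body_content_py body out) := by unfold Spec_extract_body_content_py; infer_instance

-- ===== CLAIM (what is proved, stated in full; the proofs are below) =====
def Claim_equal_extract_body_content_py : Prop := ∀ (body : String), Dom_extract_body_content_py body → Spec_extract_body_content_py body (extract_body_content_py body)

-- ===== LEMMAS AND PROOFS =====
-- once the flag is false, A's loop appends every remaining line
theorem pv_fold_false (ls : List String) (acc : List String) :
    (ls.foldl pvStepA (acc, false)).1 = acc ++ ls := by
  induction ls generalizing acc with
  | nil => simp
  | cons l rest ih =>
      rw [List.foldl_cons]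
      have h : pvStepA (acc, false) l = (acc ++ [l], false) := by simp [pvStepA]
      rw [h, ih]; simp

-- ===== VERDICT (by name: the statement is the Claim_ definition above) =====
theorem extract_body_content_py_spec : Claim_equal_extract_body_content_py := by
  intro body _
  unfold Spec_extract_body_content_py extract_body_content_py extract_body_content_py_alt
  cases h : (PySem.Str.split? body "\n").getD [] with
  | nil => simp
  | cons l rest =>
      by_cases hs : PySem.Chars.startswith l.toList ['#'] = true
      · have h1 : pvStepA ([], true) l = ([], false) := by simp [pvStepA, PySem.Str.startswith_eq, hs]
        simp only [List.foldl_cons, h1, pv_fold_false]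
        simp [hs]
      · have h1 : pvStepA ([], true) l = ([l], false) := by simp [pvStepA, PySem.Str.startswith_eq, hs]
        simp only [List.foldl_cons, h1, pv_fold_false]
        simp [hs]
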